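-- pv_equiv track=rewrite | github.com/BoudewijnKlijn/competitive_programming | google_kickstart/2021/G/s2.py | get_median_distance
-- ===== SOURCE A (Python) =====
-- def get_median_distance(distances):
--     distances = [d for d in distances if d != 0]
--     if len(distances) == 0:
--         return 0
--     elif len(distances) % 2 == 0:
--         return sorted(distances)[len(distances) // 2 - 1]
--     else:
--         return sorted(distances)[len(distances) // 2]
-- ===== SOURCE B (Python) =====
-- def get_median_distance(distances):
--     xs = [d for d in distances if d != 0]
--     if not xs:
--         return 0
--     k = (len(xs) - 1) // 2
--     # quickselect: find the k-th smallest without fully sorting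
--     while True:
--         pivot = xs[len(xs) // 2]
--         lt = [x for x in xs if x < pivot]
--         eq = [x for x in xs if x == pivot]
--         if k < len(lt):
--             xs = lt
--         elif k < len(lt) + len(eq):
--             return pivot
--         else:
--             k -= len(lt) + len(eq)
--             xs = [x for x in xs if x > pivot]
-- ===== Notes on version B (the rewrite author's own statement) =====
-- stated objective: faster
-- what changed: Replaced sort-then-index with an iterative three-way-partition quickselect that finds only the single (lower-)median rank after dropping zeros.
import Mathlib
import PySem

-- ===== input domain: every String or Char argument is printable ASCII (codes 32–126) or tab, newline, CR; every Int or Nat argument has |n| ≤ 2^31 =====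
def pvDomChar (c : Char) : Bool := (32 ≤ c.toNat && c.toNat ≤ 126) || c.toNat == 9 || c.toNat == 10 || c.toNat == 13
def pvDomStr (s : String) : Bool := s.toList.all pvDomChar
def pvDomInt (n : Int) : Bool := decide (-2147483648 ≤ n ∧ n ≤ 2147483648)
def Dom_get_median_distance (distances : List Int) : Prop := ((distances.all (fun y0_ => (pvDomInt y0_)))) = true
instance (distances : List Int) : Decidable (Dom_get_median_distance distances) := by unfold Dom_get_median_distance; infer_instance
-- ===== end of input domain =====

-- B replaces sort-then-index by a three-way-partition quickselect for the single target rank (objective: faster).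

-- ===== PORT A =====
def get_median_distance (distances : List Int) : Int :=
  let ds := distances.filter (fun d => decide (d ≠ 0))
  if ds.length = 0 then 0
  else if ds.length % 2 = 0 then
    (PySem.List.sorted ds (fun x => x) false).getD (ds.length / 2 - 1) 0
  else
    (PySem.List.sorted ds (fun x => x) false).getD (ds.length / 2) 0

-- ===== PORT B =====
-- the quickselect loop of Source B, as a recursion; the fuel argument only makes the
-- recursion structural (xs.length is always enough fuel, proved below)
def pvSelect : Nat → List Int → Nat → Int
  | 0, _, _ => 0
  | fuel + 1, xs, k =>
    if xs.length = 0 then 0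
    else
      let pivot := xs.getD (xs.length / 2) 0
      let lt := xs.filter (fun x => decide (x < pivot))
      let eq := xs.filter (fun x => decide (x = pivot))
      if k < lt.length then pvSelect fuel lt k
      else if k < lt.length + eq.length then pivot
      else pvSelect fuel (xs.filter (fun x => decide (pivot < x))) (k - (lt.length + eq.length))

def get_median_distance_alt (distances : List Int) : Int :=
  let xs := distances.filter (fun d => decide (d ≠ 0))
  if xs.length = 0 then 0
  else pvSelect xs.length xs ((xs.length - 1) / 2)

-- ===== PRECONDITION & SPEC =====
def Spec_get_median_distance (distances : List Int) (out : Int) : Prop := out = get_median_distance_alt distances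
instance (distances : List Int) (out : Int) : Decidable (Spec_get_median_distance distances out) := by unfold Spec_get_median_distance; infer_instance

-- ===== CLAIM (what is proved, stated in full; the proofs are below) =====
def Claim_equal_get_median_distance : Prop := ∀ (distances : List Int), Dom_get_median_distance distances → Spec_get_median_distance distances (get_median_distance distances)

-- ===== LEMMAS AND PROOFS =====

theorem pvFilter_lt_of_mem {p : Int → Bool} {xs : List Int} {a : Int}
    (ha : a ∈ xs) (hp : p a = false) : (xs.filter p).length < xs.length :=
  List.length_filter_lt_length_iff_exists.mpr ⟨a, ha, by simp [hp]⟩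

theorem pvGetD_mem {xs : List Int} (h : xs.length ≠ 0) : xs.getD (xs.length / 2) 0 ∈ xs := by
  have hlt : xs.length / 2 < xs.length := Nat.div_lt_self (Nat.pos_of_ne_zero h) (by norm_num)
  rw [List.getD_eq_getElem _ _ hlt]; exact List.getElem_mem hlt

-- the three-way partition is a permutation of the list
theorem pvPartPerm (p : Int) (xs : List Int) :
    (xs.filter (fun x => decide (x < p)) ++ xs.filter (fun x => decide (x = p)) ++
      xs.filter (fun x => decide (p < x))).Perm xs := by
  induction xs with
  | nil => simp
  | cons a t ih =>
    rcases lt_trichotomy a p with h | h | h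
    · have h2 : ¬(a = p) := ne_of_lt h
      have h3 : ¬(p < a) := not_lt_of_gt h
      simp only [List.filter_cons, h, h2, h3, decide_true, decide_false, if_true,
        List.cons_append]
      exact ih.cons a
    · subst h
      have h1 : ¬(a < a) := lt_irrefl a
      simp only [List.filter_cons, h1, decide_true, decide_false, if_true]
      refine List.Perm.trans ?_ (ih.cons a)
      simpa [List.append_assoc] using
        (List.perm_middle (a := a) (l₁ := List.filter (fun x => decide (x < a)) t)
          (l₂ := List.filter (fun x => decide (x = a)) t ++ List.filter (fun x => decide (a < x)) t))
    · have h2 : ¬(a = p) := (ne_of_gt h)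
      have h3 : ¬(a < p) := not_lt_of_gt h
      simp only [List.filter_cons, h, h2, h3, decide_true, decide_false, if_true]
      refine List.Perm.trans ?_ (ih.cons a)
      simpa [List.append_assoc] using
        (List.perm_middle (a := a)
          (l₁ := List.filter (fun x => decide (x < p)) t ++ List.filter (fun x => decide (x = p)) t)
          (l₂ := List.filter (fun x => decide (p < x)) t))

-- sorting decomposes along a three-way partition
theorem pvSortedDecomp (p : Int) (xs : List Int) :
    PySem.List.sorted xs (fun x => x) false =
      PySem.List.sorted (xs.filter (fun x => decide (x < p))) (fun x => x) false ++
      xs.filter (fun x => decide (x = p)) ++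
      PySem.List.sorted (xs.filter (fun x => decide (p < x))) (fun x => x) false := by
  apply PySem.List.sorted_id_eq_of_perm_of_pairwise
  · exact (((PySem.List.sorted_perm _ _ _).append (List.Perm.refl _)).append
      (PySem.List.sorted_perm _ _ _)).trans (pvPartPerm p xs)
  · rw [List.append_assoc, List.pairwise_append]
    refine ⟨by simpa using PySem.List.sorted_pairwise (xs := xs.filter (fun x => decide (x < p))) (key := fun x => x), ?_, ?_⟩
    · rw [List.pairwise_append]
      refine ⟨?_, by simpa using PySem.List.sorted_pairwise (xs := xs.filter (fun x => decide (p < x))) (key := fun x => x), ?_⟩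
      · refine List.pairwise_of_forall_mem_list (fun a ha b hb => ?_)
        rw [List.mem_filter] at ha hb
        have h1 : a = p := by simpa using ha.2
        have h2 : b = p := by simpa using hb.2
        exact le_of_eq (h1.trans h2.symm)
      · intro a ha b hb
        rw [List.mem_filter] at ha
        rw [PySem.List.mem_sorted, List.mem_filter] at hb
        have h1 : a = p := by simpa using ha.2
        have h2 : p < b := by simpa using hb.2
        exact le_of_lt (h1 ▸ h2)
    · intro a ha b hb
      rw [PySem.List.mem_sorted, List.mem_filter] at ha
      have h1 : a < p := by simpa using ha.2
      rcases List.mem_append.mp hb with hb | hb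
      · rw [List.mem_filter] at hb
        have h2 : b = p := by simpa using hb.2
        exact le_of_lt (h2 ▸ h1)
      · rw [PySem.List.mem_sorted, List.mem_filter] at hb
        have h2 : p < b := by simpa using hb.2
        exact le_of_lt (h1.trans h2)

-- quickselect computes the k-th element of the sorted list
theorem pvSelect_eq (n : Nat) : ∀ (xs : List Int) (k : Nat), xs.length ≤ n → k < xs.length →
    pvSelect n xs k = (PySem.List.sorted xs (fun x => x) false).getD k 0 := by
  induction n with
  | zero => intro xs k hn hk; omega
  | succ n ih =>
    intro xs k hn hk
    have hne : xs.length ≠ 0 := by omega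
    rw [pvSelect]
    simp only [hne, if_false]
    set p := xs.getD (xs.length / 2) 0 with hp
    have hltlen : (xs.filter (fun x => decide (x < p))).length < xs.length :=
      pvFilter_lt_of_mem (pvGetD_mem hne) (by rw [← hp]; simp)
    have hgtlen : (xs.filter (fun x => decide (p < x))).length < xs.length :=
      pvFilter_lt_of_mem (pvGetD_mem hne) (by rw [← hp]; simp)
    have hlen : (xs.filter (fun x => decide (x < p))).length +
        (xs.filter (fun x => decide (x = p))).length +
        (xs.filter (fun x => decide (p < x))).length = xs.length := by
      have h := (pvPartPerm p xs).length_eq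
      simpa [Nat.add_assoc] using h
    have hdec := pvSortedDecomp p xs
    have hslt : (PySem.List.sorted (xs.filter (fun x => decide (x < p))) (fun x => x) false).length
        = (xs.filter (fun x => decide (x < p))).length := PySem.List.length_sorted _ _ _
    by_cases h1 : k < (xs.filter (fun x => decide (x < p))).length
    · rw [if_pos h1, hdec, List.append_assoc,
        List.getD_append _ _ _ _ (by rw [hslt]; exact h1)]
      exact ih _ k (by omega) h1
    · rw [if_neg h1]
      by_cases h2 : k < (xs.filter (fun x => decide (x < p))).length +
          (xs.filter (fun x => decide (x = p))).length
      · rw [if_pos h2, hdec, List.append_assoc,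
          List.getD_append_right _ _ _ _ (by rw [hslt]; omega), hslt,
          List.getD_append _ _ _ _ (by omega)]
        have hkin : k - (xs.filter (fun x => decide (x < p))).length <
            (xs.filter (fun x => decide (x = p))).length := by omega
        rw [List.getD_eq_getElem _ _ hkin]
        have hm := List.getElem_mem hkin
        rw [List.mem_filter] at hm
        have : (xs.filter (fun x => decide (x = p)))[k - (xs.filter (fun x => decide (x < p))).length] = p := by
          simpa using hm.2
        exact this.symm
      · rw [if_neg h2, hdec, List.append_assoc,
          List.getD_append_right _ _ _ _ (by rw [hslt]; omega), hslt,
          List.getD_append_right _ _ _ _ (by omega)]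
        rw [ih _ (k - ((xs.filter (fun x => decide (x < p))).length +
            (xs.filter (fun x => decide (x = p))).length)) (by omega) (by omega)]
        congr 1
        omega

-- ===== VERDICT (by name: the statement is the Claim_ definition above) =====
theorem get_median_distance_spec : Claim_equal_get_median_distance := by
  intro distances _
  unfold Spec_get_median_distance get_median_distance get_median_distance_alt
  set ds := distances.filter (fun d => decide (d ≠ 0)) with hds
  by_cases h0 : ds.length = 0
  · simp [h0]
  · simp only [h0, if_false]
    have hk : (ds.length - 1) / 2 < ds.length := by omega
    rw [pvSelect_eq ds.length ds ((ds.length - 1) / 2) le_rfl hk]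
    by_cases hpar : ds.length % 2 = 0
    · rw [if_pos hpar]
      congr 1
      omega
    · rw [if_neg hpar]
      congr 1
      omega
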